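-- pv_equiv track=rewrite | github.com/NDThacker/Python_practice | countMultiPairs.py | printRPairs
-- ===== SOURCE A (Python) =====
-- def printRPairs(inpL):
-- 	count = 0
-- 	ind = 0
-- 	leng = len(inpL) - 1
-- 	while (ind < leng):
-- 		if(inpL[ind] == 0 or ind == 0):
-- 			ind += 1
-- 			continue
-- 		ind2 = ind + 1
-- 		while(ind2 < leng+1):
-- 			if(inpL[ind] > inpL[ind2]):
-- 				count += 1
-- 			ind2 += 1
-- 		ind += 1
-- 	return count
-- ===== SOURCE B (Python) =====
-- def printRPairs(inpL):
--     count = 0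
--     prev = []  # sorted list of nonzero values inpL[i] for indices 0 < i < current j
--     for j in range(len(inpL)):
--         v = inpL[j]
--         # binary search: lo = number of elements of prev that are <= v
--         lo, hi = 0, len(prev)
--         while lo < hi:
--             mid = (lo + hi) // 2
--             if prev[mid] <= v:
--                 lo = mid + 1
--             else:
--                 hi = mid
--         count += len(prev) - lo
--         if j > 0 and v != 0:
--             prev = prev[:lo] + [v] + prev[lo:]
--     return count
-- ===== Notes on version B (the rewrite author's own statement) =====
-- stated objective: faster
-- what changed: single left-to-right pass that keeps the qualifying earlier values in a sorted list and counts each new element's contribution by binary search, instead of A's nested index loops comparing every pair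
import Mathlib
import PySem

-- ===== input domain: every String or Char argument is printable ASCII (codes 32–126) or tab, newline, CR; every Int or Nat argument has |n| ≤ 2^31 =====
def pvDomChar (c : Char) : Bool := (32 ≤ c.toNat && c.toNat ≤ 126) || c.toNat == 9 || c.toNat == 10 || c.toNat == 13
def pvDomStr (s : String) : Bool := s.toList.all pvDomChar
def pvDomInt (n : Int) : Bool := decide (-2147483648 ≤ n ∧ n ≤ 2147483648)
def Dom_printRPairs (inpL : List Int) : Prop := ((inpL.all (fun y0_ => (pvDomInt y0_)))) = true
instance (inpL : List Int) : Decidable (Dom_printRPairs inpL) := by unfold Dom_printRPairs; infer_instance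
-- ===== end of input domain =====

-- B replaces A's nested all-pairs index loops by one pass that keeps the qualifying earlier
-- values in a sorted list and counts each element's contribution by binary search (measured faster).

-- ===== PORT A =====
-- inner while: ind2 from ind+1 while ind2 < leng+1 (= len inpL); indices are always in range,
-- so inpL[ind] / inpL[ind2] are ported as getD _ 0 (exact here).
def pvInner (l : List Int) (ind n ind2 : Nat) (count : Int) : Int :=
  if ind2 < n then
    pvInner l ind n (ind2 + 1) (if l.getD ind 0 > l.getD ind2 0 then count + 1 else count)
  else count
  termination_by n - ind2

-- outer while: ind from 0 while ind < leng (= len inpL - 1); Nat subtraction matches Python's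
-- int leng here since for the empty list both loop conditions are false.
def pvOuter (l : List Int) (n ind : Nat) (count : Int) : Int :=
  if ind < n - 1 then
    if l.getD ind 0 = 0 ∨ ind = 0 then pvOuter l n (ind + 1) count
    else pvOuter l n (ind + 1) (pvInner l ind n (ind + 1) count)
  else count
  termination_by (n - 1) - ind

def printRPairs (inpL : List Int) : Int :=
  pvOuter inpL inpL.length 0 0

-- ===== PORT B =====
-- the while lo < hi binary search; lo, hi, mid are nonnegative and mid is always in range in
-- Python, so prev[mid] is ported as getD _ 0 and the counters as Nat (exact here).
def pvBisect (prev : List Int) (v : Int) (lo hi : Nat) : Nat :=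
  if lo < hi then
    let mid := (lo + hi) / 2
    if prev.getD mid 0 ≤ v then pvBisect prev v (mid + 1) hi
    else pvBisect prev v lo mid
  else lo
  termination_by hi - lo
  decreasing_by all_goals simp_all [mid]; omega

-- one iteration of B's for-loop body; prev[:lo] + [v] + prev[lo:] is take/drop (0 ≤ lo ≤ len,
-- PySem.List.slice_to_natCast / slice_from_natCast).
def pvStep (l : List Int) (st : Int × List Int) (j : Nat) : Int × List Int :=
  let v := l.getD j 0
  let lo := pvBisect st.2 v 0 st.2.length
  let c := st.1 + ((st.2.length - lo : Nat) : Int)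
  if 0 < j ∧ v ≠ 0 then (c, st.2.take lo ++ v :: st.2.drop lo) else (c, st.2)

-- for j in range(len(inpL)) → fold over List.range (= PySem.List.pyRange 0 n 1)
def printRPairs_alt (inpL : List Int) : Int :=
  ((List.range inpL.length).foldl (pvStep inpL) (0, [])).1

-- ===== PRECONDITION & SPEC =====
def Spec_printRPairs (inpL : List Int) (out : Int) : Prop := out = printRPairs_alt inpL
instance (inpL : List Int) (out : Int) : Decidable (Spec_printRPairs inpL out) := by unfold Spec_printRPairs; infer_instance

-- ===== CLAIM (what is proved, stated in full; the proofs are below) =====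
def Claim_equal_printRPairs : Prop := ∀ (inpL : List Int), Dom_printRPairs inpL → Spec_printRPairs inpL (printRPairs inpL)

-- ===== LEMMAS AND PROOFS =====

-- the pair (i, j) contributes 1 iff 0 < i < j, l[i] ≠ 0 and l[i] > l[j]
def pvF (l : List Int) (i j : Nat) : Nat :=
  if 1 ≤ i ∧ i < j ∧ l.getD i 0 ≠ 0 ∧ l.getD j 0 < l.getD i 0 then 1 else 0

-- the values l[i], 0 < i < j, l[i] ≠ 0 — what B's prev holds (as a multiset) before step j
def pvKept (l : List Int) (j : Nat) : List Int :=
  ((l.take j).drop 1).filter (fun x => decide (x ≠ 0))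

lemma sorted_getD_mono (l : List Int) (hs : l.Pairwise (· ≤ ·)) {i j : Nat}
    (hij : i ≤ j) (hj : j < l.length) : l.getD i 0 ≤ l.getD j 0 := by
  rcases eq_or_lt_of_le hij with rfl | hlt
  · exact le_refl _
  · have hi : i < l.length := lt_trans hlt hj
    rw [l.getD_eq_getElem 0 hi, l.getD_eq_getElem 0 hj]
    exact List.pairwise_iff_getElem.1 hs i j hi hj hlt

lemma pvBisect_spec_aux (prev : List Int) (v : Int) (hs : prev.Pairwise (· ≤ ·)) :
    ∀ fuel lo hi, hi - lo ≤ fuel → lo ≤ hi → hi ≤ prev.length →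
    (∀ k < lo, prev.getD k 0 ≤ v) →
    (∀ k, hi ≤ k → k < prev.length → v < prev.getD k 0) →
    lo ≤ pvBisect prev v lo hi ∧ pvBisect prev v lo hi ≤ hi ∧
      (∀ k < pvBisect prev v lo hi, prev.getD k 0 ≤ v) ∧
      (∀ k, pvBisect prev v lo hi ≤ k → k < prev.length → v < prev.getD k 0) := by
  intro fuel
  induction fuel with
  | zero =>
    intro lo hi hf hlo hhi h1 h2
    have : ¬ lo < hi := by omega
    rw [pvBisect, if_neg this]
    exact ⟨le_rfl, hlo, h1, fun k hk => h2 k (by omega)⟩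
  | succ f ih =>
    intro lo hi hf hlo hhi h1 h2
    by_cases hlt : lo < hi
    · rw [pvBisect, if_pos hlt]
      simp only []
      set mid := (lo + hi) / 2 with hmid
      have hm1 : lo ≤ mid := by omega
      have hm2 : mid < hi := by omega
      have hmlen : mid < prev.length := by omega
      by_cases hc : prev.getD mid 0 ≤ v
      · rw [if_pos hc]
        have h1' : ∀ k < mid + 1, prev.getD k 0 ≤ v := by
          intro k hk
          exact le_trans (sorted_getD_mono prev hs (by omega) hmlen) hc
        have res := ih (mid + 1) hi (by omega) (by omega) hhi h1' h2
        exact ⟨by omega, res.2.1, res.2.2.1, res.2.2.2⟩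
      · rw [if_neg hc]
        rw [not_le] at hc
        have h2' : ∀ k, mid ≤ k → k < prev.length → v < prev.getD k 0 := by
          intro k hk hklen
          exact lt_of_lt_of_le hc (sorted_getD_mono prev hs hk hklen)
        have res := ih lo mid (by omega) (by omega) (by omega) h1 h2'
        exact ⟨res.1, by omega, res.2.2.1, res.2.2.2⟩
    · rw [pvBisect, if_neg hlt]
      exact ⟨le_rfl, hlo, h1, fun k hk => h2 k (by omega)⟩

lemma pvBisect_spec (prev : List Int) (v : Int) (lo hi : Nat)
    (hs : prev.Pairwise (· ≤ ·)) (hlo : lo ≤ hi) (hhi : hi ≤ prev.length)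
    (h1 : ∀ k < lo, prev.getD k 0 ≤ v)
    (h2 : ∀ k, hi ≤ k → k < prev.length → v < prev.getD k 0) :
    lo ≤ pvBisect prev v lo hi ∧ pvBisect prev v lo hi ≤ hi ∧
      (∀ k < pvBisect prev v lo hi, prev.getD k 0 ≤ v) ∧
      (∀ k, pvBisect prev v lo hi ≤ k → k < prev.length → v < prev.getD k 0) := by
  exact pvBisect_spec_aux prev v hs (hi - lo) lo hi le_rfl hlo hhi h1 h2

-- count of elements > v from the bisect result
lemma countP_of_split (prev : List Int) (v : Int) (r : Nat) (hr : r ≤ prev.length)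
    (h1 : ∀ k < r, prev.getD k 0 ≤ v)
    (h2 : ∀ k, r ≤ k → k < prev.length → v < prev.getD k 0) :
    prev.countP (fun p => decide (v < p)) = prev.length - r := by
  have key : prev.countP (fun p => decide (v < p)) =
      (prev.take r).countP (fun p => decide (v < p)) +
      (prev.drop r).countP (fun p => decide (v < p)) := by
    conv_lhs => rw [← List.take_append_drop r prev]
    rw [List.countP_append]
  have ht : (prev.take r).countP (fun p => decide (v < p)) = 0 := by
    apply List.countP_eq_zero.2
    intro a ha
    obtain ⟨i, hi, rfl⟩ := List.mem_iff_getElem.1 ha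
    have hir : i < r := by simp [List.length_take] at hi; omega
    have hilen : i < prev.length := by simp [List.length_take] at hi; omega
    have hle := h1 i hir
    rw [prev.getD_eq_getElem 0 hilen] at hle
    simp only [List.getElem_take, decide_eq_true_eq]
    omega
  have hd : (prev.drop r).countP (fun p => decide (v < p)) = (prev.drop r).length := by
    apply List.countP_eq_length.2
    intro a ha
    obtain ⟨i, hi, rfl⟩ := List.mem_iff_getElem.1 ha
    have hilen : r + i < prev.length := by simp [List.length_drop] at hi; omega
    have hlt := h2 (r + i) (by omega) hilen
    rw [prev.getD_eq_getElem 0 hilen] at hlt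
    simp only [List.getElem_drop, decide_eq_true_eq]
    omega
  rw [key, ht, hd, List.length_drop]
  omega

lemma sorted_insert (prev : List Int) (v : Int) (r : Nat) (hr : r ≤ prev.length)
    (hs : prev.Pairwise (· ≤ ·))
    (h1 : ∀ k < r, prev.getD k 0 ≤ v)
    (h2 : ∀ k, r ≤ k → k < prev.length → v < prev.getD k 0) :
    (prev.take r ++ v :: prev.drop r).Pairwise (· ≤ ·) := by
  have htake : ∀ a ∈ prev.take r, a ≤ v := by
    intro a ha
    obtain ⟨i, hi, rfl⟩ := List.mem_iff_getElem.1 ha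
    have hir : i < r := by simp [List.length_take] at hi; omega
    have hilen : i < prev.length := by simp [List.length_take] at hi; omega
    have hle := h1 i hir
    rw [prev.getD_eq_getElem 0 hilen] at hle
    simpa [List.getElem_take] using hle
  have hdrop : ∀ a ∈ prev.drop r, v < a := by
    intro a ha
    obtain ⟨i, hi, rfl⟩ := List.mem_iff_getElem.1 ha
    have hilen : r + i < prev.length := by simp [List.length_drop] at hi; omega
    have hlt := h2 (r + i) (by omega) hilen
    rw [prev.getD_eq_getElem 0 hilen] at hlt
    simpa [List.getElem_drop] using hlt
  rw [List.pairwise_append]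
  refine ⟨hs.sublist (List.take_sublist r prev), ?_, ?_⟩
  · rw [List.pairwise_cons]
    exact ⟨fun a ha => le_of_lt (hdrop a ha), hs.sublist (List.drop_sublist r prev)⟩
  · intro a ha b hb
    rcases List.mem_cons.1 hb with rfl | hb2
    · exact htake a ha
    · exact le_of_lt (lt_of_le_of_lt (htake a ha) (hdrop b hb2))

lemma pvKept_succ (l : List Int) (m : Nat) (hm : m < l.length) :
    pvKept l (m + 1) =
      if 0 < m ∧ l.getD m 0 ≠ 0 then pvKept l m ++ [l.getD m 0] else pvKept l m := by
  unfold pvKept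
  set a := l.getD m 0 with hadef
  have htk : l.take (m + 1) = l.take m ++ [a] := by
    rw [List.take_add_one, List.getElem?_eq_getElem hm, hadef, l.getD_eq_getElem 0 hm]
    rfl
  rcases Nat.eq_zero_or_pos m with rfl | hpos
  · simp [htk]
  · have hlen : 1 ≤ (l.take m).length := by simp [List.length_take]; omega
    rw [htk, List.drop_append_of_le_length hlen, List.filter_append]
    by_cases hz : a = 0
    · simp [hz, hpos]
    · simp [hz]; omega

-- countP as a 0/1 sum over indices
lemma countP_eq_sum (p : Int → Bool) (xs : List Int) :
    xs.countP p = ∑ k ∈ Finset.range xs.length, (if p (xs.getD k 0) then 1 else 0) := by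
  induction xs with
  | nil => simp
  | cons x xs ih =>
    rw [List.countP_cons, List.length_cons, Finset.sum_range_succ']
    simp only [List.getD_cons_succ, List.getD_cons_zero]
    rw [ih]

-- ===== A-side loop characterisations =====

lemma pvInner_eq (l : List Int) (ind n : Nat) : ∀ ind2 count,
    pvInner l ind n ind2 count =
      count + (∑ j ∈ Finset.Ico ind2 n,
        (if l.getD j 0 < l.getD ind 0 then 1 else 0) : Nat) := by
  have aux : ∀ fuel ind2 count, n - ind2 ≤ fuel →
      pvInner l ind n ind2 count = count + (∑ j ∈ Finset.Ico ind2 n,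
        (if l.getD j 0 < l.getD ind 0 then 1 else 0) : Nat) := by
    intro fuel
    induction fuel with
    | zero =>
      intro ind2 count hf
      rw [pvInner, if_neg (by omega), Finset.Ico_eq_empty (by omega)]
      simp
    | succ f ih =>
      intro ind2 count hf
      by_cases h : ind2 < n
      · rw [pvInner, if_pos h,
          ih (ind2 + 1) (if l.getD ind 0 > l.getD ind2 0 then count + 1 else count) (by omega),
          Finset.sum_eq_sum_Ico_succ_bot h]
        split_ifs with hc
        · push_cast
          ring
        · push_cast
          ring
      · rw [pvInner, if_neg h, Finset.Ico_eq_empty (by omega)]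
        simp
  exact fun ind2 count => aux (n - ind2) ind2 count le_rfl

def pvG (l : List Int) (n i : Nat) : Nat :=
  if l.getD i 0 = 0 ∨ i = 0 then 0
  else ∑ j ∈ Finset.Ico (i + 1) n, (if l.getD j 0 < l.getD i 0 then 1 else 0)

lemma pvOuter_eq (l : List Int) (n : Nat) : ∀ ind count,
    pvOuter l n ind count = count + (∑ i ∈ Finset.Ico ind (n - 1), pvG l n i : Nat) := by
  have aux : ∀ fuel ind count, (n - 1) - ind ≤ fuel →
      pvOuter l n ind count = count + (∑ i ∈ Finset.Ico ind (n - 1), pvG l n i : Nat) := by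
    intro fuel
    induction fuel with
    | zero =>
      intro ind count hf
      rw [pvOuter, if_neg (by omega), Finset.Ico_eq_empty (by omega)]
      simp
    | succ f ih =>
      intro ind count hf
      by_cases h : ind < n - 1
      · rw [pvOuter]
        rw [if_pos h, Finset.sum_eq_sum_Ico_succ_bot h]
        by_cases hskip : l.getD ind 0 = 0 ∨ ind = 0
        · rw [if_pos hskip, ih (ind + 1) count (by omega)]
          have hg : pvG l n ind = 0 := by rw [pvG, if_pos hskip]
          rw [hg]
          push_cast
          ring
        · rw [if_neg hskip, ih (ind + 1) (pvInner l ind n (ind + 1) count) (by omega),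
            pvInner_eq]
          have hg : pvG l n ind =
              ∑ j ∈ Finset.Ico (ind + 1) n, (if l.getD j 0 < l.getD ind 0 then 1 else 0) := by
            rw [pvG, if_neg hskip]
          rw [hg]
          push_cast
          ring
      · rw [pvOuter, if_neg h, Finset.Ico_eq_empty (by omega)]
        simp
  exact fun ind count => aux ((n - 1) - ind) ind count le_rfl

lemma printRPairs_eq_rowSum (l : List Int) :
    printRPairs l =
      (∑ i ∈ Finset.range l.length, ∑ j ∈ Finset.range l.length, pvF l i j : Nat) := by
  unfold printRPairs
  rw [pvOuter_eq, ← Finset.range_eq_Ico, zero_add]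
  congr 1
  rcases Nat.eq_zero_or_pos l.length with h0 | hpos
  · rw [h0]
    simp
  · have hn : l.length = (l.length - 1) + 1 := by omega
    have hsplit := Finset.sum_range_succ
      (fun i => ∑ j ∈ Finset.range l.length, pvF l i j) (l.length - 1)
    rw [← hn] at hsplit
    rw [hsplit]
    have hlast : ∑ j ∈ Finset.range l.length, pvF l (l.length - 1) j = 0 := by
      apply Finset.sum_eq_zero
      intro j hj
      rw [Finset.mem_range] at hj
      rw [pvF, if_neg]
      rintro ⟨-, h2, -, -⟩
      omega
    rw [hlast, add_zero]
    apply Finset.sum_congr rfl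
    intro i hi
    rw [Finset.mem_range] at hi
    rw [pvG]
    by_cases hskip : l.getD i 0 = 0 ∨ i = 0
    · rw [if_pos hskip]
      symm
      apply Finset.sum_eq_zero
      intro j hj
      rw [pvF, if_neg]
      rintro ⟨h1, -, h3, -⟩
      rcases hskip with h | h
      · exact h3 h
      · omega
    · rw [if_neg hskip]
      push Not at hskip
      have hsub : Finset.Ico (i + 1) l.length ⊆ Finset.range l.length := by
        intro j hj
        rw [Finset.mem_Ico] at hj
        exact Finset.mem_range.2 hj.2
      rw [← Finset.sum_subset hsub (by
        intro j hj hj2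
        rw [Finset.mem_range] at hj
        rw [Finset.mem_Ico] at hj2
        rw [pvF, if_neg]
        rintro ⟨-, h2, -, -⟩
        omega)]
      apply Finset.sum_congr rfl
      intro j hj
      rw [Finset.mem_Ico] at hj
      rw [pvF]
      by_cases hc : l.getD j 0 < l.getD i 0
      · have hbig : 1 ≤ i ∧ i < j ∧ l.getD i 0 ≠ 0 ∧ l.getD j 0 < l.getD i 0 :=
          ⟨by omega, hj.1, hskip.1, hc⟩
        rw [if_pos hbig, if_pos hc]
      · have hbig : ¬(1 ≤ i ∧ i < j ∧ l.getD i 0 ≠ 0 ∧ l.getD j 0 < l.getD i 0) := by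
          rintro ⟨-, -, -, h⟩
          exact hc h
        rw [if_neg hbig, if_neg hc]

-- ===== B-side loop characterisation =====

lemma pvFold_spec (l : List Int) : ∀ m, m ≤ l.length →
    ((List.range m).foldl (pvStep l) (0, [])).1 =
        ((∑ j ∈ Finset.range m,
          (pvKept l j).countP (fun p => decide (l.getD j 0 < p)) : Nat) : Int) ∧
      ((List.range m).foldl (pvStep l) (0, [])).2.Pairwise (· ≤ ·) ∧
      ((List.range m).foldl (pvStep l) (0, [])).2.Perm (pvKept l m) := by
  intro m
  induction m with
  | zero =>
    intro _
    refine ⟨by simp, by simp, by simp [pvKept]⟩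
  | succ m ih =>
    intro hm1
    have hm : m < l.length := by omega
    obtain ⟨ihc, ihs, ihp⟩ := ih (le_of_lt hm)
    rw [List.range_succ, List.foldl_append, List.foldl_cons, List.foldl_nil]
    set st := (List.range m).foldl (pvStep l) (0, []) with hst
    set v := l.getD m 0 with hv
    set r := pvBisect st.2 v 0 st.2.length with hr
    have hbs := pvBisect_spec st.2 v 0 st.2.length ihs (Nat.zero_le _) le_rfl
      (fun k hk => absurd hk (Nat.not_lt_zero k))
      (fun k hk hk2 => absurd (lt_of_le_of_lt hk hk2) (lt_irrefl _))
    have hrle : r ≤ st.2.length := hbs.2.1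
    have hcnt : st.2.countP (fun p => decide (v < p)) = st.2.length - r :=
      countP_of_split st.2 v r hrle hbs.2.2.1 hbs.2.2.2
    have hcnt' : (pvKept l m).countP (fun p => decide (v < p)) = st.2.length - r := by
      rw [← ihp.countP_eq]
      exact hcnt
    have hfst : (pvStep l st m).1 =
        ((∑ j ∈ Finset.range (m + 1),
          (pvKept l j).countP (fun p => decide (l.getD j 0 < p)) : Nat) : Int) := by
      rw [pvStep]
      simp only [← hv, ← hr]
      rw [apply_ite Prod.fst]
      have : st.1 + ((st.2.length - r : Nat) : Int) =
          ((∑ j ∈ Finset.range (m + 1),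
            (pvKept l j).countP (fun p => decide (l.getD j 0 < p)) : Nat) : Int) := by
        rw [ihc, Finset.sum_range_succ, ← hv, hcnt']
        push_cast
        ring
      split_ifs <;> exact this
    refine ⟨hfst, ?_, ?_⟩
    · rw [pvStep]
      simp only [← hv, ← hr]
      rw [apply_ite Prod.snd]
      split_ifs with hcond
      · exact sorted_insert st.2 v r hrle ihs hbs.2.2.1 hbs.2.2.2
      · exact ihs
    · rw [pvStep]
      simp only [← hv, ← hr]
      rw [apply_ite Prod.snd, pvKept_succ l m hm, ← hv]
      split_ifs with hcond
      · have p1 : (st.2.take r ++ v :: st.2.drop r).Perm (v :: st.2) := by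
          have hmid := @List.perm_middle _ v (st.2.take r) (st.2.drop r)
          rwa [List.take_append_drop] at hmid
        exact p1.trans ((ihp.cons v).trans (List.perm_append_singleton v (pvKept l m)).symm)
      · exact ihp

lemma col_eq (l : List Int) (j : Nat) (hj : j < l.length) :
    (pvKept l j).countP (fun p => decide (l.getD j 0 < p)) =
      ∑ i ∈ Finset.range l.length, pvF l i j := by
  unfold pvKept
  rw [List.countP_filter, countP_eq_sum]
  have hlen : ((l.take j).drop 1).length = j - 1 := by
    simp [List.length_drop, List.length_take]
    omega
  rw [hlen]
  have hget : ∀ k, k < j - 1 → ((l.take j).drop 1).getD k 0 = l.getD (1 + k) 0 := by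
    intro k hk
    have h1 : k < ((l.take j).drop 1).length := by omega
    have h2 : 1 + k < l.length := by omega
    rw [(List.drop 1 (List.take j l)).getD_eq_getElem 0 h1, l.getD_eq_getElem 0 h2]
    simp only [List.getElem_drop, List.getElem_take]
  have hsub : Finset.Ico 1 j ⊆ Finset.range l.length := by
    intro i hi
    rw [Finset.mem_Ico] at hi
    exact Finset.mem_range.2 (by omega)
  rw [← Finset.sum_subset hsub (by
    intro i hi hi2
    rw [Finset.mem_range] at hi
    rw [Finset.mem_Ico] at hi2
    rw [pvF, if_neg]
    rintro ⟨h1, h2, -, -⟩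
    omega)]
  rw [Finset.sum_Ico_eq_sum_range]
  apply Finset.sum_congr rfl
  intro k hk
  rw [Finset.mem_range] at hk
  rw [hget k hk, pvF]
  by_cases h0 : l.getD (1 + k) 0 = 0
  · have hb : (decide (l.getD j 0 < l.getD (1 + k) 0) && decide (l.getD (1 + k) 0 ≠ 0))
        = false := by rw [decide_eq_false (not_not_intro h0), Bool.and_false]
    have hnb : ¬(1 ≤ 1 + k ∧ 1 + k < j ∧ l.getD (1 + k) 0 ≠ 0 ∧
        l.getD j 0 < l.getD (1 + k) 0) := by
      rintro ⟨-, -, h, -⟩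
      exact h h0
    rw [hb, if_neg hnb]
    simp
  · by_cases hc : l.getD j 0 < l.getD (1 + k) 0
    · have hb : (decide (l.getD j 0 < l.getD (1 + k) 0) && decide (l.getD (1 + k) 0 ≠ 0))
          = true := by rw [decide_eq_true hc, decide_eq_true h0]; rfl
      have hbig : 1 ≤ 1 + k ∧ 1 + k < j ∧ l.getD (1 + k) 0 ≠ 0 ∧ l.getD j 0 < l.getD (1 + k) 0 :=
        ⟨by omega, by omega, h0, hc⟩
      rw [hb, if_pos hbig]
      simp
    · have hb : (decide (l.getD j 0 < l.getD (1 + k) 0) && decide (l.getD (1 + k) 0 ≠ 0))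
          = false := by rw [decide_eq_false hc, Bool.false_and]
      have hnb : ¬(1 ≤ 1 + k ∧ 1 + k < j ∧ l.getD (1 + k) 0 ≠ 0 ∧
          l.getD j 0 < l.getD (1 + k) 0) := by
        rintro ⟨-, -, -, h⟩
        exact hc h
      rw [hb, if_neg hnb]
      simp

lemma printRPairs_alt_eq_colSum (l : List Int) :
    printRPairs_alt l =
      (∑ j ∈ Finset.range l.length, ∑ i ∈ Finset.range l.length, pvF l i j : Nat) := by
  unfold printRPairs_alt
  obtain ⟨hc, -, -⟩ := pvFold_spec l l.length le_rfl
  rw [hc]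
  congr 1
  exact Finset.sum_congr rfl (fun j hj => col_eq l j (Finset.mem_range.1 hj))

-- ===== VERDICT (by name: the statement is the Claim_ definition above) =====
theorem printRPairs_spec : Claim_equal_printRPairs := by
  intro l _
  unfold Spec_printRPairs
  rw [printRPairs_eq_rowSum, printRPairs_alt_eq_colSum, Finset.sum_comm]
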